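-- pv_equiv track=rewrite | github.com/jeongYuri/coding-test-solution | 프로그래머스/unrated/181854. 배열의 길이에 따라 다른 연산하기/배열의 길이에 따라 다른 연산하기.py | solution
-- ===== SOURCE A (Python) =====
-- def solution(arr, n):
--     for i, value in enumerate(arr):
--         if len(arr) % 2 != 0:
--             if i % 2 == 0:
--                 arr[i] += n
--         else:
--             if i % 2 != 0:
--                 arr[i] += n
--     return arr
-- ===== SOURCE B (Python) =====
-- def solution(arr, n):
--     start = 0 if len(arr) % 2 == 1 else 1
--     for i in range(start, len(arr), 2):
--         arr[i] += n
--     return arr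
-- ===== Notes on version B (the rewrite author's own statement) =====
-- stated objective: simpler
-- what changed: B computes the starting index from the length parity once and visits only the affected indices with a stride-2 range, instead of enumerating every element and re-testing the length and index parity inside the loop.
import Mathlib
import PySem

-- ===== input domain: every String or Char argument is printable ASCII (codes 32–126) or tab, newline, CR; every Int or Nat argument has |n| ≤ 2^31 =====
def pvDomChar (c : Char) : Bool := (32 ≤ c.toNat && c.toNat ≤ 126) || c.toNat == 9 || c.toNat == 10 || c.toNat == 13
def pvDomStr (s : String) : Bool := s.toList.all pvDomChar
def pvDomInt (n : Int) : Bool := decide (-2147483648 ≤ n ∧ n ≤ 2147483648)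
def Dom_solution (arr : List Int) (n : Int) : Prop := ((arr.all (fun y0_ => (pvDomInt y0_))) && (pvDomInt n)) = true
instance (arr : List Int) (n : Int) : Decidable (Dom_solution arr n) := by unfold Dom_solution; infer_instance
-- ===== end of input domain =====

-- B replaces A's enumerate-and-test-index-parity loop by a stride-2 range over exactly the
-- affected indices (objective: simpler). Both A and B mutate arr in place and return it;
-- the theorems below are about the returned value.

-- ===== PORT A =====
-- `len(arr)` inside the loop reads the list being mutated; item assignment never changes the
-- length, so it is the initial length `arr.length` on every iteration.
def solution (arr : List Int) (n : Int) : List Int :=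
  (PySem.List.enumerate arr).foldl
    (fun a p =>
      if (arr.length : Int) % 2 ≠ 0 then
        (if p.1 % 2 = 0 then PySem.List.pySetD a p.1 (PySem.List.pyGetD a p.1 0 + n) else a)
      else
        (if p.1 % 2 ≠ 0 then PySem.List.pySetD a p.1 (PySem.List.pyGetD a p.1 0 + n) else a))
    arr

-- ===== PORT B =====
def solution_alt (arr : List Int) (n : Int) : List Int :=
  let start : Int := if (arr.length : Int) % 2 = 1 then 0 else 1
  (PySem.List.pyRange start arr.length 2).foldl
    (fun a i => PySem.List.pySetD a i (PySem.List.pyGetD a i 0 + n)) arr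

-- ===== PRECONDITION & SPEC =====
def Spec_solution (arr : List Int) (n : Int) (out : List Int) : Prop := out = solution_alt arr n
instance (arr : List Int) (n : Int) (out : List Int) : Decidable (Spec_solution arr n out) := by unfold Spec_solution; infer_instance

-- ===== CLAIM (what is proved, stated in full; the proofs are below) =====
def Claim_equal_solution : Prop := ∀ (arr : List Int) (n : Int), Dom_solution arr n → Spec_solution arr n (solution arr n)

-- ===== LEMMAS AND PROOFS =====

-- Folding the in-place bump `arr[i] += n` over a list of distinct in-range indices
-- rewrites each listed position once; the result is a positional map.
theorem foldl_bump_eq_mapIdx (idxs : List Int) (a : List Int) (n : Int)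
    (hnd : idxs.Nodup) (hin : ∀ i ∈ idxs, 0 ≤ i ∧ i < a.length) :
    idxs.foldl (fun a i => PySem.List.pySetD a i (PySem.List.pyGetD a i 0 + n)) a
      = a.mapIdx (fun j x => if (j : Int) ∈ idxs then x + n else x) := by
  induction idxs generalizing a with
  | nil =>
      simp [List.foldl_nil]
      apply List.ext_getElem (by simp)
      intro j h1 h2
      simp
  | cons i rest ih =>
      have hi := hin i (List.mem_cons_self ..)
      have hset : PySem.List.pySetD a i (PySem.List.pyGetD a i 0 + n)
          = a.set i.toNat (a[i.toNat]'(by omega) + n) := by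
        rw [PySem.List.pySetD_of_nonneg _ _ hi.1,
            PySem.List.pyGetD_eq_getElem _ _ hi.1 hi.2]
      have hlen : (a.set i.toNat (a[i.toNat]'(by omega) + n)).length = a.length := by simp
      rw [List.foldl_cons, hset, ih _ hnd.of_cons
        (by intro k hk; have := hin k (List.mem_cons_of_mem _ hk); omega)]
      apply List.ext_getElem (by simp)
      intro j h1 h2
      have hjlen : j < a.length := by simpa using h1
      have hine : i ∉ rest := (List.nodup_cons.mp hnd).1
      simp only [List.getElem_mapIdx, List.getElem_set]
      by_cases hji : (j : Int) = i
      · have : i.toNat = j := by omega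
        simp [this, hji, hine]
      · have : i.toNat ≠ j := by omega
        simp only [if_neg this, List.mem_cons]
        have : ¬ ((j : Int) = i ∨ (j : Int) ∈ rest) ↔ (j : Int) ∉ rest := by tauto
        by_cases hm : (j : Int) ∈ rest <;> simp [hm, hji]

theorem nodup_pyRange_two (a b : Int) : (PySem.List.pyRange a b 2).Nodup := by
  rw [PySem.List.pyRange_of_pos a b (by norm_num)]
  exact (List.nodup_range).map (fun x y h => by omega)

-- ===== VERDICT (by name: the statement is the Claim_ definition above) =====
theorem solution_spec : Claim_equal_solution := by
  intro arr n _
  show solution arr n = solution_alt arr n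
  unfold solution solution_alt
  set L : Int := (arr.length : Int) with hL
  -- A's fold over `enumerate` only uses the index component
  have hfst : (PySem.List.enumerate arr).map (·.1) = PySem.List.pyRange 0 L 1 := by
    simpa using PySem.List.map_fst_enumerate arr 0
  rw [show (PySem.List.enumerate arr).foldl
        (fun a p =>
          if L % 2 ≠ 0 then
            (if p.1 % 2 = 0 then PySem.List.pySetD a p.1 (PySem.List.pyGetD a p.1 0 + n) else a)
          else
            (if p.1 % 2 ≠ 0 then PySem.List.pySetD a p.1 (PySem.List.pyGetD a p.1 0 + n) else a))
        arr
      = ((PySem.List.enumerate arr).map (·.1)).foldl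
        (fun a i =>
          if L % 2 ≠ 0 then
            (if i % 2 = 0 then PySem.List.pySetD a i (PySem.List.pyGetD a i 0 + n) else a)
          else
            (if i % 2 ≠ 0 then PySem.List.pySetD a i (PySem.List.pyGetD a i 0 + n) else a))
        arr from by rw [List.foldl_map], hfst]
  have hmem1 : ∀ x ∈ PySem.List.pyRange 0 L 1, 0 ≤ x ∧ x < L := by
    intro x hx; rw [PySem.List.mem_pyRange_one] at hx; exact hx
  by_cases hpar : L % 2 = 1
  · -- odd length: A bumps even indices, B starts at 0
    have h2 : L % 2 ≠ 0 := by omega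
    simp only [if_pos h2, if_pos hpar]
    rw [show (PySem.List.pyRange 0 L 1).foldl
          (fun a i => if i % 2 = 0 then PySem.List.pySetD a i (PySem.List.pyGetD a i 0 + n) else a) arr
        = ((PySem.List.pyRange 0 L 1).filter (fun i => decide (i % 2 = 0))).foldl
          (fun a i => PySem.List.pySetD a i (PySem.List.pyGetD a i 0 + n)) arr from by
        rw [List.foldl_filter]; simp]
    rw [foldl_bump_eq_mapIdx _ _ _ ((PySem.List.nodup_pyRange_one 0 L).filter _)
          (by intro k hk; have := hmem1 k (List.mem_filter.mp hk).1; omega),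
        foldl_bump_eq_mapIdx _ _ _ (nodup_pyRange_two 0 L)
          (by intro k hk
              rw [PySem.List.mem_pyRange_iff_of_pos (by norm_num)] at hk; omega)]
    apply List.ext_getElem (by simp)
    intro j h1 h2'
    have hj : (j : Int) < L := by simp only [hL]; exact_mod_cast (by simpa using h1)
    simp only [List.getElem_mapIdx]
    have hiff : (j : Int) ∈ (PySem.List.pyRange 0 L 1).filter (fun i => decide (i % 2 = 0))
        ↔ (j : Int) ∈ PySem.List.pyRange 0 L 2 := by
      rw [List.mem_filter, PySem.List.mem_pyRange_one,
          PySem.List.mem_pyRange_iff_of_pos (by norm_num)]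
      simp only [decide_eq_true_eq]
      omega
    exact if_congr hiff rfl rfl
  · -- even length: A bumps odd indices, B starts at 1
    have h2 : ¬ L % 2 ≠ 0 := by
      have : 0 ≤ L := by positivity
      omega
    simp only [if_neg h2, if_neg hpar]
    rw [show (PySem.List.pyRange 0 L 1).foldl
          (fun a i => if i % 2 ≠ 0 then PySem.List.pySetD a i (PySem.List.pyGetD a i 0 + n) else a) arr
        = ((PySem.List.pyRange 0 L 1).filter (fun i => decide (i % 2 ≠ 0))).foldl
          (fun a i => PySem.List.pySetD a i (PySem.List.pyGetD a i 0 + n)) arr from by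
        rw [List.foldl_filter]; simp]
    rw [foldl_bump_eq_mapIdx _ _ _ ((PySem.List.nodup_pyRange_one 0 L).filter _)
          (by intro k hk; have := hmem1 k (List.mem_filter.mp hk).1; omega),
        foldl_bump_eq_mapIdx _ _ _ (nodup_pyRange_two 1 L)
          (by intro k hk
              rw [PySem.List.mem_pyRange_iff_of_pos (by norm_num)] at hk; omega)]
    apply List.ext_getElem (by simp)
    intro j h1 h2'
    have hj : (j : Int) < L := by simp only [hL]; exact_mod_cast (by simpa using h1)
    simp only [List.getElem_mapIdx]
    have hiff : (j : Int) ∈ (PySem.List.pyRange 0 L 1).filter (fun i => decide (i % 2 ≠ 0))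
        ↔ (j : Int) ∈ PySem.List.pyRange 1 L 2 := by
      rw [List.mem_filter, PySem.List.mem_pyRange_one,
          PySem.List.mem_pyRange_iff_of_pos (by norm_num)]
      simp only [decide_eq_true_eq]
      omega
    exact if_congr hiff rfl rfl
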